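-- pv_equiv track=rewrite | github.com/fathomdx-io/fathomdx | api/_feed_reflection.py | format_activity_pool
-- ===== SOURCE A (Python) =====
-- def format_activity_pool(pool: list[dict], limit: int = 60) -> str:
--     """Compact format for the activity stream. Source-grouped so the
--     LLM sees what *kinds* of work happened, not just a flat timeline."""
--     if not pool:
--         return "(no reflectable activity in the window)"
--     by_source: dict[str, list[dict]] = {}
--     for d in pool[:limit]:
--         src = (d.get("source") or "?").lower()
--         by_source.setdefault(src, []).append(d)
--
--     sections: list[str] = []
--     for src in sorted(by_source.keys()):
--         items = by_source[src]
--         lines = [f"--- {src} ({len(items)}) ---"]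
--         for d in items[:20]:
--             ts = (d.get("timestamp") or "")[:19]
--             content = (d.get("content") or "").strip().replace("\n", " ")[:240]
--             lines.append(f"  [{ts}] {content}")
--         sections.append("\n".join(lines))
--     return "\n\n".join(sections)
-- ===== SOURCE B (Python) =====
-- def format_activity_pool(pool: list[dict], limit: int = 60) -> str:
--     """Recursive min-selection grouping: repeatedly peel off the smallest
--     source key and its items, no dict and no sort."""
--     if not pool:
--         return "(no reflectable activity in the window)"
--
--     def key(d):
--         return (d.get("source") or "?").lower()
--
--     def fmt(d):
--         ts = (d.get("timestamp") or "")[:19]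
--         content = (d.get("content") or "").strip().replace("\n", " ")[:240]
--         return f"  [{ts}] {content}"
--
--     def section(src, items):
--         return "\n".join([f"--- {src} ({len(items)}) ---"] + [fmt(d) for d in items[:20]])
--
--     def go(rest):
--         if not rest:
--             return []
--         src = min(key(d) for d in rest)
--         items = [d for d in rest if key(d) == src]
--         others = [d for d in rest if key(d) != src]
--         return [section(src, items)] + go(others)
--
--     return "\n\n".join(go(pool[:limit]))
-- ===== Notes on version B (the rewrite author's own statement) =====
-- stated objective: alternative
-- what changed: Replaces A's setdefault-grouping dict plus key sort by a recursive min-selection: repeatedly take the smallest remaining source key, emit its section from a filter pass, and recurse on the rest, so no dict and no sort call exist.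
import Mathlib
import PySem

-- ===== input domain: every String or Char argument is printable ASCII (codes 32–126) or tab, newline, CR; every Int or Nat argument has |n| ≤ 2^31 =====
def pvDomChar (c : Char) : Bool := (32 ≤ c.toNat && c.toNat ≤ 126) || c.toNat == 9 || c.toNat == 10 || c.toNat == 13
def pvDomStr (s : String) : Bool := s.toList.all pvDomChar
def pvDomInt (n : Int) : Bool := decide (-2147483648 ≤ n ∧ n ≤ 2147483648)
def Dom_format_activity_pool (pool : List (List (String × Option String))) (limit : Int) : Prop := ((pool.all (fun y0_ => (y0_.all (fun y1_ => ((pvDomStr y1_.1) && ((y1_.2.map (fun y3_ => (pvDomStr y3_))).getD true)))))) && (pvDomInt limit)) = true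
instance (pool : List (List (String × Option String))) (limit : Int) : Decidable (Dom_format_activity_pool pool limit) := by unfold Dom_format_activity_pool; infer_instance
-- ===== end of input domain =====

-- B replaces A's grouping dict + key sort by a recursive min-selection over the remaining
-- items (objective: alternative; same output text, no speed claim).

-- shared primitive helpers: Python's `d.get(k)` (None when absent) and `x or dflt`
-- (empty string is falsy), and the per-item pieces both Pythons compute identically.
def pyDictGet (d : List (String × Option String)) (k : String) : Option String :=
  ((PySem.Dict.mk d).get? k).join

def pyOrStr (o : Option String) (dflt : String) : String :=
  match o with
  | none => dflt
  | some s => if s = "" then dflt else s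

-- src = (d.get("source") or "?").lower()
def fap_key (d : List (String × Option String)) : String :=
  PySem.Str.lower (pyOrStr (pyDictGet d "source") "?")

-- "  [{ts}] {content}"  with  ts = (d.get("timestamp") or "")[:19],
-- content = (d.get("content") or "").strip().replace("\n", " ")[:240]
def fap_line (d : List (String × Option String)) : String :=
  "  [" ++ PySem.Str.slice (pyOrStr (pyDictGet d "timestamp") "") none (some 19) ++ "] " ++
    PySem.Str.slice (PySem.Str.replace (PySem.Str.strip (pyOrStr (pyDictGet d "content") ""))
      "\n" " ") none (some 240)

-- ===== PORT A =====
def format_activity_pool (pool : List (List (String × Option String))) (limit : Int) : String :=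
  if pool = [] then "(no reflectable activity in the window)"
  else
    -- by_source: one pass over pool[:limit], setdefault(src, []).append(d)
    let by_source : PySem.Dict String (List (List (String × Option String))) :=
      (PySem.List.slice pool none (some limit)).foldl
        (fun acc d => acc.modify (fap_key d) [] (fun cur => cur ++ [d])) PySem.Dict.empty
    let sections : List String :=
      (PySem.List.sorted by_source.keys (fun k => k) false).map (fun src =>
        let items := by_source.getD src []
        PySem.Str.join "\n"
          (("--- " ++ src ++ " (" ++ PySem.Int.toStr (PySem.List.len items) ++ ") ---") ::
            (PySem.List.slice items none (some 20)).map fap_line))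
    PySem.Str.join "\n\n" sections

-- ===== PORT B =====
-- B's `section(src, items)`: "\n".join([header] + [fmt(d) for d in items[:20]])
def fap_section (src : String) (items : List (List (String × Option String))) : String :=
  PySem.Str.join "\n"
    (("--- " ++ src ++ " (" ++ PySem.Int.toStr (PySem.List.len items) ++ ") ---") ::
      (PySem.List.slice items none (some 20)).map fap_line)

-- B's `go(rest)`: peel off the minimum source key and its items, recurse on the rest.
-- `min(key(d) for d in rest)` on the nonempty `rest` is ported as the running-min fold
-- (PySem.List.min?_id_cons names this as exactly Python's min of a nonempty list).
def fap_go (rest : List (List (String × Option String))) : List String :=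
  match h : rest with
  | [] => []
  | r :: rs =>
    let src := (rs.map fap_key).foldl min (fap_key r)
    let items := (r :: rs).filter (fun d => fap_key d == src)
    let others := (r :: rs).filter (fun d => fap_key d != src)
    fap_section src items :: fap_go others
  termination_by rest.length
  decreasing_by
    subst h
    simp only [List.map_subtype, List.unattach_attach]
    have hmem : (rs.map fap_key).foldl min (fap_key r) = fap_key r ∨
        (rs.map fap_key).foldl min (fap_key r) ∈ rs.map fap_key :=
      PySem.List.foldl_min_mem _ _
    have : ∃ d ∈ r :: rs, ¬ ((fap_key d != (rs.map fap_key).foldl min (fap_key r)) = true) := by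
      rcases hmem with h1 | h1
      · exact ⟨r, by simp, by simp [h1]⟩
      · rcases List.mem_map.mp h1 with ⟨d, hd, hk⟩
        exact ⟨d, List.mem_cons_of_mem _ hd, by simp [hk]⟩
    rcases this with ⟨d, hd, hnd⟩
    exact List.length_filter_lt_length_iff_exists ..|>.mpr ⟨d, hd, hnd⟩

def format_activity_pool_alt (pool : List (List (String × Option String))) (limit : Int) : String :=
  if pool = [] then "(no reflectable activity in the window)"
  else PySem.Str.join "\n\n" (fap_go (PySem.List.slice pool none (some limit)))

-- ===== PRECONDITION & SPEC =====
def Spec_format_activity_pool (pool : List (List (String × Option String))) (limit : Int) (out : String) : Prop := out = format_activity_pool_alt pool limit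
instance (pool : List (List (String × Option String))) (limit : Int) (out : String) : Decidable (Spec_format_activity_pool pool limit out) := by unfold Spec_format_activity_pool; infer_instance

-- ===== CLAIM (what is proved, stated in full; the proofs are below) =====
def Claim_equal_format_activity_pool : Prop := ∀ (pool : List (List (String × Option String))) (limit : Int), Dom_format_activity_pool pool limit → Spec_format_activity_pool pool limit (format_activity_pool pool limit)

-- ===== LEMMAS AND PROOFS =====

-- A's grouping dict, looked up at any key, is exactly the filter of the truncated pool.
theorem fap_getD_group (head : List (List (String × Option String))) (src : String) :
    (head.foldl (fun acc d => acc.modify (fap_key d) [] (fun cur => cur ++ [d]))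
        (PySem.Dict.empty : PySem.Dict String (List (List (String × Option String))))).getD src []
      = head.filter (fun d => fap_key d == src) := by
  have h := PySem.Dict.getD_foldl_modify_append
    (head.map (fun x => (fap_key x, x)))
    (PySem.Dict.empty : PySem.Dict String (List (List (String × Option String)))) src
  rw [List.foldl_map] at h
  rw [List.filter_map] at h
  simpa [Function.comp_def] using h

-- A's dict keys are the distinct source keys of the truncated pool, in first-occurrence order.
theorem fap_keys_group (head : List (List (String × Option String))) :
    (head.foldl (fun acc d => acc.modify (fap_key d) [] (fun cur => cur ++ [d]))
        (PySem.Dict.empty : PySem.Dict String (List (List (String × Option String))))).keys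
      = PySem.Set.ofList (head.map fap_key) := by
  have h := PySem.Dict.keys_foldl_modify_key head fap_key []
    (fun _ d => (fun cur => cur ++ [d]))
    (PySem.Dict.empty : PySem.Dict String (List (List (String × Option String))))
  simpa using h

-- B's min-selection recursion produces exactly one section per distinct source key,
-- in ascending key order, each built from the filter of the ORIGINAL remaining list.
set_option maxHeartbeats 1600000 in
theorem fap_go_eq (rest : List (List (String × Option String))) :
    fap_go rest
      = (PySem.List.sorted (PySem.Set.ofList (rest.map fap_key)) (fun k => k) false).map
          (fun src => fap_section src (rest.filter (fun d => fap_key d == src))) := by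
  induction rest using fap_go.induct with
  | case1 => simp [fap_go, PySem.List.sorted_eq_nil_iff]
  | case2 r rs src others ih =>
    simp only [others, src, List.map_subtype, List.unattach_attach] at ih
    rw [fap_go]
    set m := (rs.map fap_key).foldl min (fap_key r) with hm
    set keys := (r :: rs).map fap_key with hkeys
    have hm_mem : m ∈ keys := by
      rcases PySem.List.foldl_min_mem (rs.map fap_key) (fap_key r) with h1 | h1
      · rw [hkeys]; simp only [List.map_cons]; exact List.mem_cons.mpr (Or.inl h1)
      · rw [hkeys]; simp only [List.map_cons]; exact List.mem_cons_of_mem _ h1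
    have hm_min : ∀ k ∈ keys, m ≤ k := by
      intro k hk
      rw [hkeys, List.map_cons] at hk
      rcases List.mem_cons.mp hk with h1 | h1
      · subst h1; exact (PySem.List.foldl_min_le (rs.map fap_key) (fap_key r)).1
      · exact (PySem.List.foldl_min_le (rs.map fap_key) (fap_key r)).2 k h1
    have hsplit : PySem.List.sorted (PySem.Set.ofList keys) (fun k => k) false
        = m :: PySem.List.sorted (PySem.Set.ofList (keys.filter (fun k => k != m))) (fun k => k) false := by
      have hperm : (m :: PySem.List.sorted (PySem.Set.ofList (keys.filter (fun k => k != m)))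
          (fun k => k) false).Perm (PySem.Set.ofList keys) := by
        refine List.Perm.trans (List.Perm.cons m (PySem.List.sorted_perm ..)) ?_
        refine (List.perm_ext_iff_of_nodup ?_ ?_).mpr ?_
        · refine List.nodup_cons.mpr ⟨?_, PySem.Set.nodup_ofList _⟩
          intro hmem
          have h2 := (List.mem_filter.mp ((PySem.Set.mem_ofList _ _).mp hmem)).2
          simp at h2
        · exact PySem.Set.nodup_ofList _
        · intro a
          constructor
          · intro ha
            rcases List.mem_cons.mp ha with h1 | h1
            · subst h1; exact (PySem.Set.mem_ofList _ _).mpr hm_mem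
            · exact (PySem.Set.mem_ofList _ _).mpr
                (List.mem_filter.mp ((PySem.Set.mem_ofList _ _).mp h1)).1
          · intro ha
            by_cases he : a = m
            · simp [he]
            · refine List.mem_cons_of_mem _ ((PySem.Set.mem_ofList _ _).mpr ?_)
              exact List.mem_filter.mpr ⟨(PySem.Set.mem_ofList _ _).mp ha, by simp [he]⟩
      have hpair : (m :: PySem.List.sorted (PySem.Set.ofList (keys.filter (fun k => k != m)))
          (fun k => k) false).Pairwise (· < ·) := by
        refine List.pairwise_cons.mpr ⟨?_, PySem.List.sorted_ofList_pairwise_lt _⟩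
        intro y hy
        have h2 := List.mem_filter.mp
          ((PySem.Set.mem_ofList _ _).mp ((PySem.List.mem_sorted ..).mp hy))
        have hne : y ≠ m := by simpa using h2.2
        exact lt_of_le_of_ne (hm_min y h2.1) (Ne.symm hne)
      exact PySem.List.sorted_eq_of_perm_of_pairwise_lt _ _ _ hperm hpair
    rw [hsplit, List.map_cons]
    have hmapf : (List.filter (fun d => fap_key d != m) (r :: rs)).map fap_key
        = keys.filter (fun k => k != m) := by
      rw [hkeys, List.filter_map]
      rfl
    have htail : fap_go ((r :: rs).filter (fun d => fap_key d != m))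
        = (PySem.List.sorted (PySem.Set.ofList (keys.filter (fun k => k != m)))
            (fun k => k) false).map
            (fun s => fap_section s ((r :: rs).filter (fun d => fap_key d == s))) := by
      rw [ih, hmapf]
      apply List.map_congr_left
      intro s hs
      have hsne : s ≠ m := by
        have h2 := List.mem_filter.mp
          ((PySem.Set.mem_ofList _ _).mp ((PySem.List.mem_sorted ..).mp hs))
        simpa using h2.2
      rw [List.filter_filter]
      apply congrArg (fap_section s)
      apply List.filter_congr
      intro d _
      by_cases hd : fap_key d = s
      · simp [hd, hsne]
      · simp [hd]
    rw [htail]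

-- ===== VERDICT (by name: the statement is the Claim_ definition above) =====
set_option maxHeartbeats 1000000 in
theorem format_activity_pool_spec : Claim_equal_format_activity_pool := by
  intro pool limit _
  unfold Spec_format_activity_pool format_activity_pool format_activity_pool_alt
  by_cases hp : pool = []
  · simp [hp]
  · simp only [hp, ite_false]
    rw [fap_keys_group, fap_go_eq]
    refine congrArg (PySem.Str.join "\n\n") ?_
    apply List.map_congr_left
    intro src _
    rw [fap_getD_group, fap_section]
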